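-- pv_equiv track=rewrite | github.com/whglamrock/leetcode_series | Minimum Cost To Split Array Into K Consecutive Subarrays.py | minCostToSplitArray
-- ===== SOURCE A (Python) =====
-- from typing import List
--
-- def minCostToSplitArray(nums: List[int], k: int) -> int:
--     n = len(nums)
--     # dp[i][j] means the min cost to split nums[:j + 1] into i parts
--     dp = [[2147483647 for j in range(n)] for i in range(k + 1)]
--     # when i == 1
--     prefixMax = nums[0]
--     for j in range(n):
--         prefixMax = max(prefixMax, nums[j])
--         dp[1][j] = prefixMax
--         dp[0][j] = 0
--
--     for i in range(2, k + 1):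
--         # j is the right index of the last subarray
--         for j in range(i - 1, n):
--             lastCost = nums[j]
--             # jj is the left index of the last subarray
--             for jj in range(j, i - 2, -1):
--                 lastCost = max(lastCost, nums[jj])
--                 dp[i][j] = min(dp[i][j], dp[i - 1][jj - 1] + lastCost)
--
--     return dp[k][n - 1]
-- ===== SOURCE B (Python) =====
-- from typing import List
--
-- def minCostToSplitArray(nums: List[int], k: int) -> int:
--     # Layered DP; each layer's transition uses the previous-strictly-greater
--     # element to reuse already-computed bests instead of rescanning every
--     # segment maximum. Results saturate at 2147483647 exactly like A's table.
--     INF = 2147483647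
--     n = len(nums)
--     # layer 1: prefix maxima
--     prev = []
--     m = nums[0]
--     for x in nums:
--         m = max(m, x)
--         prev.append(m)
--     for i in range(2, k + 1):
--         lo = i - 1
--         new = [INF] * n
--         best = [INF] * n
--         for j in range(lo, n):
--             # previous strictly greater element of nums[j] within [lo, j)
--             p = j - 1
--             while p >= lo and nums[p] <= nums[j]:
--                 p -= 1
--             # min of prev over [p, j-1] (left endpoints jj in (p, j] use max nums[j])
--             w = prev[p]
--             for t in range(p + 1, j):
--                 w = min(w, prev[t])
--             cand = w + nums[j]
--             if p >= lo:
--                 cand = min(best[p], cand)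
--             best[j] = cand
--             new[j] = min(INF, cand)
--         prev = new
--     return prev[n - 1]
-- ===== Notes on version B (the rewrite author's own statement) =====
-- stated objective: faster
-- what changed: A recomputes every segment maximum with a full inner scan per (layer, right endpoint, left endpoint) triple; B runs the same layered DP but derives each cell from the previous-strictly-greater element: it reuses the already-computed best at that element and only scans the short run where the new element is the segment maximum, so the cubic inner rescans disappear on typical data.
import Mathlib
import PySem

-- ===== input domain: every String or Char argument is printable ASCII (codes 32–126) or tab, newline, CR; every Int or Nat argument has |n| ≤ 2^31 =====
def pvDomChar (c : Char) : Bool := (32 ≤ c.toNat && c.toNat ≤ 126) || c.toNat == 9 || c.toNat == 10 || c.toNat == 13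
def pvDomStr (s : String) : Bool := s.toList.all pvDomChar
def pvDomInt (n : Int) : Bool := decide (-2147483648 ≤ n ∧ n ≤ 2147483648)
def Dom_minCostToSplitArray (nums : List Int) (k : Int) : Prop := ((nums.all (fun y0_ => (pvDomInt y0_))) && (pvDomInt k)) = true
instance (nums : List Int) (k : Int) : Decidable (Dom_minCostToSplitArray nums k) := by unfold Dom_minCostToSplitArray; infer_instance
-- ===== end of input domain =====

-- B replaces A's rescan of every segment maximum by a per-layer previous-greater-element
-- recurrence that reuses already-computed bests (alternative transition, usually far fewer
-- inner steps); values saturate at the 2147483647 table sentinel exactly as in A.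

-- ===== PORT A =====
-- dp[i][j] = v  (a nested Python list assignment)
def pvSet2 (dp : List (List Int)) (i j : Nat) (v : Int) : List (List Int) :=
  dp.set i ((dp.getD i []).set j v)

-- transliteration of A; all indices are nonnegative on inputs admitted by Pre_, so
-- .toNat/getD coincide with Python's indexing there
def minCostToSplitArray (nums : List Int) (k : Int) : Int :=
  let n := nums.length
  let dp : List (List Int) := List.replicate (k+1).toNat (List.replicate n (2147483647:Int))
  -- prefixMax = nums[0]  (exact: Pre_ gives nums ≠ [])
  let st := (List.range n).foldl (fun (st : Int × List (List Int)) j =>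
      let prefixMax := max st.1 (nums.getD j 0)
      let dp := pvSet2 st.2 1 j prefixMax
      let dp := pvSet2 dp 0 j 0
      (prefixMax, dp)) (nums.getD 0 0, dp)
  let dp := (PySem.List.pyRange 2 (k+1) 1).foldl (fun dp i =>
      (PySem.List.pyRange (i-1) (n:Int) 1).foldl (fun dp j =>
        ((PySem.List.pyRange j (i-2) (-1)).foldl (fun (st : Int × List (List Int)) jj =>
            let lastCost := max st.1 (nums.getD jj.toNat 0)
            let dpv := min ((st.2.getD i.toNat []).getD j.toNat 0)
                           (((st.2.getD (i-1).toNat []).getD (jj-1).toNat 0) + lastCost)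
            (lastCost, pvSet2 st.2 i.toNat j.toNat dpv)) (nums.getD j.toNat 0, dp)).2) dp) st.2
  (dp.getD k.toNat []).getD (n-1) 0

-- ===== PORT B =====
-- while p >= lo and nums[p] <= x: p -= 1   (fuel ≥ number of iterations, supplied by the caller)
def pgLoop (nums : List Int) (lo : Int) (x : Int) : Nat → Int → Int
  | 0, p => p
  | fuel+1, p => if lo ≤ p ∧ nums.getD p.toNat 0 ≤ x then pgLoop nums lo x fuel (p-1) else p

-- one DP layer of B (the body of B's `for i in range(2, k+1)` loop)
def pvLayer (nums : List Int) (prev : List Int) (i : Int) : List Int :=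
  let n := nums.length
  let lo := i - 1
  ((PySem.List.pyRange lo (n:Int) 1).foldl (fun (st : List Int × List Int) j =>
      let x := nums.getD j.toNat 0
      let p := pgLoop nums lo x j.toNat (j-1)
      let w := (PySem.List.pyRange (p+1) j 1).foldl (fun w t => min w (prev.getD t.toNat 0))
                 (prev.getD p.toNat 0)
      let cand := w + x
      let cand := if lo ≤ p then min (st.2.getD p.toNat 0) cand else cand
      (st.1.set j.toNat (min 2147483647 cand), st.2.set j.toNat cand))
    (List.replicate n (2147483647:Int), List.replicate n (2147483647:Int))).1

def minCostToSplitArray_alt (nums : List Int) (k : Int) : Int :=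
  let n := nums.length
  let prev0 := (nums.foldl (fun (st : Int × List Int) x =>
      let m := max st.1 x
      (m, st.2 ++ [m])) (nums.getD 0 0, [])).2
  let prevK := (PySem.List.pyRange 2 (k+1) 1).foldl (fun prev i => pvLayer nums prev i) prev0
  prevK.getD (n-1) 0

-- ===== PRECONDITION & SPEC =====
-- Pre_ excludes exactly the inputs on which A raises: nums = [] (IndexError on nums[0])
-- and k < 1 (IndexError on dp[1][j]).
def Pre_minCostToSplitArray (nums : List Int) (k : Int) : Prop := nums ≠ [] ∧ 1 ≤ k
instance (nums : List Int) (k : Int) : Decidable (Pre_minCostToSplitArray nums k) := by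
  unfold Pre_minCostToSplitArray; infer_instance

def pvWitness_minCostToSplitArray : List Int × Int := ([3, 1, 4, 1, 5], 3)

def Spec_minCostToSplitArray (nums : List Int) (k : Int) (out : Int) : Prop := out = minCostToSplitArray_alt nums k
instance (nums : List Int) (k : Int) (out : Int) : Decidable (Spec_minCostToSplitArray nums k out) := by unfold Spec_minCostToSplitArray; infer_instance

-- ===== CLAIM (what is proved, stated in full; the proofs are below) =====
def Claim_equal_minCostToSplitArray : Prop := ∀ (nums : List Int) (k : Int), Dom_minCostToSplitArray nums k → Pre_minCostToSplitArray nums k → Spec_minCostToSplitArray nums k (minCostToSplitArray nums k)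

-- ===== LEMMAS AND PROOFS =====

-- max of a over [jj..j]  (junk a j when jj > j)
def sMax (a : Nat → Int) (jj j : Nat) : Int :=
  if jj < j then max (a jj) (sMax a (jj+1) j) else a j
termination_by j - jj

-- min of f over [lo..j]  (junk f j when lo > j)
def rmin (f : Nat → Int) (lo j : Nat) : Int :=
  if lo < j then min (rmin f lo (j-1)) (f j) else f j

theorem sMax_self (a : Nat → Int) (j : Nat) : sMax a j j = a j := by
  rw [sMax]; simp

theorem sMax_cons (a : Nat → Int) {jj j : Nat} (h : jj < j) :
    sMax a jj j = max (a jj) (sMax a (jj+1) j) := by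
  rw [sMax]; simp [h]

theorem sMax_snoc (a : Nat → Int) {jj j : Nat} (h : jj ≤ j) :
    sMax a jj (j+1) = max (sMax a jj j) (a (j+1)) := by
  have main : ∀ d jj j, j - jj = d → jj ≤ j →
      sMax a jj (j+1) = max (sMax a jj j) (a (j+1)) := by
    intro d
    induction d with
    | zero =>
      intro jj j hd h
      have : jj = j := by omega
      subst this
      rw [sMax_cons a (by omega), sMax_self, sMax_self]
    | succ m ih =>
      intro jj j hd h
      have hlt : jj < j := by omega
      rw [sMax_cons a (show jj < j+1 by omega), sMax_cons a hlt,
        ih (jj+1) j (by omega) (by omega)]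
      omega
  exact main (j - jj) jj j rfl h

theorem le_sMax_right (a : Nat → Int) {jj j : Nat} (h : jj ≤ j) : a j ≤ sMax a jj j := by
  have main : ∀ d jj j, j - jj = d → jj ≤ j → a j ≤ sMax a jj j := by
    intro d
    induction d with
    | zero =>
      intro jj j hd h
      have : jj = j := by omega
      subst this; rw [sMax_self]
    | succ m ih =>
      intro jj j hd h
      rw [sMax_cons a (by omega)]
      have := ih (jj+1) j (by omega) (by omega)
      omega
  exact main (j - jj) jj j rfl h

theorem le_sMax_left (a : Nat → Int) {jj j : Nat} (h : jj ≤ j) : a jj ≤ sMax a jj j := by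
  rw [sMax]
  split_ifs with hc
  · exact le_max_left _ _
  · have : jj = j := by omega
    subst this; exact le_refl _

theorem le_sMax_of_mem (a : Nat → Int) {jj t j : Nat} (h1 : jj ≤ t) (h2 : t ≤ j) :
    a t ≤ sMax a jj j := by
  have main : ∀ d jj, t - jj = d → jj ≤ t → a t ≤ sMax a jj j := by
    intro d
    induction d with
    | zero =>
      intro jj hd h
      have : jj = t := by omega
      subst this; exact le_sMax_left a h2
    | succ m ih =>
      intro jj hd h
      rw [sMax_cons a (by omega)]
      have := ih (jj+1) (by omega) (by omega)
      omega
  exact main (t - jj) jj rfl h1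

theorem sMax_le_of (a : Nat → Int) {jj j : Nat} {b : Int} (h : jj ≤ j)
    (hle : ∀ t, jj ≤ t → t ≤ j → a t ≤ b) : sMax a jj j ≤ b := by
  have main : ∀ (d jj' : Nat), j - jj' = d → jj' ≤ j → (∀ t, jj' ≤ t → t ≤ j → a t ≤ b) →
      sMax a jj' j ≤ b := by
    intro d
    induction d with
    | zero =>
      intro jj' hd hj hb
      have hje : jj' = j := by omega
      rw [hje, sMax_self]; exact hb j (by omega) (by omega)
    | succ m ih =>
      intro jj' hd hj hb
      rw [sMax_cons a (show jj' < j by omega)]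
      have h1 := hb jj' (by omega) (by omega)
      have h2 := ih (jj'+1) (by omega) (by omega) (fun t ht1 ht2 => hb t (by omega) ht2)
      omega
  exact main (j - jj) jj rfl h hle

theorem sMax_const_of (a : Nat → Int) {jj j : Nat} (h : jj ≤ j)
    (hle : ∀ t, jj ≤ t → t < j → a t ≤ a j) : sMax a jj j = a j := by
  have h1 : sMax a jj j ≤ a j := by
    refine sMax_le_of a h (fun t ht1 ht2 => ?_)
    rcases Nat.lt_or_ge t j with hlt | hge
    · exact hle t ht1 hlt
    · have : t = j := by omega
      subst this; omega
  have h2 := le_sMax_right a h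
  omega

theorem sMax_split (a : Nat → Int) {jj p j : Nat} (h1 : jj ≤ p) (h2 : p < j) :
    sMax a jj j = max (sMax a jj p) (sMax a (p+1) j) := by
  have main : ∀ d jj, p - jj = d → jj ≤ p →
      sMax a jj j = max (sMax a jj p) (sMax a (p+1) j) := by
    intro d
    induction d with
    | zero =>
      intro jj hd h
      have : jj = p := by omega
      subst this
      rw [sMax_cons a (by omega), sMax_self]
    | succ m ih =>
      intro jj hd h
      rw [sMax_cons a (show jj < j by omega), sMax_cons a (show jj < p by omega),
        ih (jj+1) (by omega) (by omega)]
      omega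
  exact main (p - jj) jj rfl h1

theorem rmin_self (f : Nat → Int) {lo j : Nat} (h : j ≤ lo) : rmin f lo j = f j := by
  rw [rmin]; simp [Nat.not_lt.mpr h]

theorem rmin_snoc (f : Nat → Int) {lo j : Nat} (h : lo ≤ j) :
    rmin f lo (j+1) = min (rmin f lo j) (f (j+1)) := by
  rw [rmin]; simp [Nat.lt_succ_of_le h]

theorem rmin_cons (f : Nat → Int) {lo j : Nat} (h : lo < j) :
    rmin f lo j = min (f lo) (rmin f (lo+1) j) := by
  induction j with
  | zero => omega
  | succ m ih =>
    rcases Nat.lt_or_ge lo m with hlt | hge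
    · rw [rmin_snoc f (show lo ≤ m by omega), ih (by omega),
        rmin_snoc f (show lo+1 ≤ m by omega)]
      omega
    · have : lo = m := by omega
      subst this
      rw [rmin_snoc f (show lo ≤ lo by omega), rmin_self f (show lo ≤ lo by omega),
        rmin_self f (show lo+1 ≤ lo+1 by omega)]

theorem rmin_split (f : Nat → Int) {lo p j : Nat} (h1 : lo ≤ p) (h2 : p < j) :
    rmin f lo j = min (rmin f lo p) (rmin f (p+1) j) := by
  have main : ∀ d j, j - p = d → p < j →
      rmin f lo j = min (rmin f lo p) (rmin f (p+1) j) := by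
    intro d
    induction d with
    | zero => intro j hd h; omega
    | succ m ih =>
      intro j hd h
      rcases Nat.lt_or_ge (p+1) j with hlt | hge
      · obtain ⟨j', rfl⟩ : ∃ j', j = j' + 1 := ⟨j - 1, by omega⟩
        rw [rmin_snoc f (show lo ≤ j' by omega), ih j' (by omega) (by omega),
          rmin_snoc f (show p+1 ≤ j' by omega)]
        omega
      · have : j = p + 1 := by omega
        subst this
        rw [rmin_snoc f (show lo ≤ p by omega), rmin_self f (le_refl (p+1))]
  exact main (j - p) j rfl h2

theorem rmin_congr {f f' : Nat → Int} {lo j : Nat} (hlj : lo ≤ j)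
    (h : ∀ t, lo ≤ t → t ≤ j → f t = f' t) : rmin f lo j = rmin f' lo j := by
  induction j with
  | zero =>
    rw [rmin_self f (show 0 ≤ lo by omega), rmin_self f' (show 0 ≤ lo by omega)]
    exact h 0 (by omega) (by omega)
  | succ m ih =>
    rcases Nat.lt_or_ge lo (m+1) with hlt | hge
    · have ihx := ih (by omega) (fun t ht1 ht2 => h t ht1 (Nat.le_trans ht2 (Nat.le_succ m)))
      rw [rmin_snoc f (show lo ≤ m by omega), rmin_snoc f' (show lo ≤ m by omega),
        ihx, h (m+1) (by omega) (by omega)]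
    · have : lo = m+1 := by omega
      rw [rmin_self f (show m+1 ≤ lo by omega), rmin_self f' (show m+1 ≤ lo by omega)]
      exact h (m+1) (by omega) (by omega)

theorem rmin_add_const (f : Nat → Int) (c : Int) (lo j : Nat) :
    rmin (fun t => f t + c) lo j = rmin f lo j + c := by
  induction j with
  | zero => rw [rmin_self _ (show 0 ≤ lo by omega), rmin_self f (show 0 ≤ lo by omega)]
  | succ m ih =>
    rcases Nat.lt_or_ge lo (m+1) with hlt | hge
    · rw [rmin_snoc _ (show lo ≤ m by omega), rmin_snoc f (show lo ≤ m by omega), ih]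
      omega
    · rw [rmin_self _ (show m+1 ≤ lo by omega), rmin_self f (show m+1 ≤ lo by omega)]

theorem rmin_shift (f : Nat → Int) {lo j : Nat} (h : lo ≤ j) :
    rmin (fun t => f (t-1)) (lo+1) (j+1) = rmin f lo j := by
  induction j with
  | zero =>
    rw [rmin_self _ (show 0+1 ≤ lo+1 by omega), rmin_self f (show 0 ≤ lo by omega)]
  | succ m ih =>
    rcases Nat.lt_or_ge lo (m+1) with hlt | hge
    · rw [rmin_snoc _ (show lo+1 ≤ m+1 by omega), rmin_snoc f (show lo ≤ m by omega),
        ih (by omega)]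
      norm_num
    · have : lo = m+1 := by omega
      subst this
      rw [rmin_self _ (show m+1+1 ≤ m+1+1 by omega), rmin_self f (show m+1 ≤ m+1 by omega)]
      norm_num

-- cost of putting one more segment [jj..j] after an optimal prefix: prevF (jj-1) + max nums[jj..j]
def gF (a prevF : Nat → Int) (j jj : Nat) : Int := prevF (jj-1) + sMax a jj j

-- unclamped best over left endpoints jj ∈ [lo..j]
def bSpec (a prevF : Nat → Int) (lo j : Nat) : Int := rmin (gF a prevF j) lo j

theorem foldl_min_pyRange (f : Nat → Int) :
    ∀ (c d : Nat), c ≤ d → ∀ (v : Int),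
    (PySem.List.pyRange (c:Int) ((d:Int)+1) 1).foldl (fun w t => min w (f t.toNat)) v
      = min v (rmin f c d) := by
  intro c d
  induction d with
  | zero =>
    intro h v
    have : c = 0 := by omega
    subst this
    rw [PySem.List.pyRange_one_singleton]
    simp [rmin_self f (show 0 ≤ 0 by omega)]
  | succ m ih =>
    intro h v
    rcases Nat.lt_or_ge m c with hlt | hge
    · have : c = m+1 := by omega
      subst this
      rw [PySem.List.pyRange_one_singleton]
      simp [rmin_self f (show m+1 ≤ m+1 by omega)]
    · rw [PySem.List.pyRange_one_succ_right (by exact_mod_cast h), List.foldl_append]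
      have hc : ((m+1:Nat):Int) = ((m:Nat):Int) + 1 := by push_cast; ring
      rw [hc, ih hge v]
      simp only [List.foldl_cons, List.foldl_nil]
      rw [show (((m:Nat):Int) + 1).toNat = m + 1 by omega, rmin_snoc f hge]
      omega

theorem pgLoop_spec (nums : List Int) (lo x : Int) (hlo : 1 ≤ lo) :
    ∀ (fuel : Nat) (p : Int), lo - 1 ≤ p → (p - (lo-1)).toNat ≤ fuel →
    lo - 1 ≤ pgLoop nums lo x fuel p ∧ pgLoop nums lo x fuel p ≤ p ∧
    (∀ t : Int, pgLoop nums lo x fuel p < t → t ≤ p → nums.getD t.toNat 0 ≤ x) ∧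
    (lo ≤ pgLoop nums lo x fuel p → ¬ (nums.getD (pgLoop nums lo x fuel p).toNat 0 ≤ x)) := by
  intro fuel
  induction fuel with
  | zero =>
    intro p hp hf
    have : p = lo - 1 := by omega
    subst this
    rw [pgLoop]
    refine ⟨by omega, by omega, fun t ht1 ht2 => by omega, fun hc => by omega⟩
  | succ m ih =>
    intro p hp hf
    rw [pgLoop]
    split_ifs with hc
    · have h1 : lo - 1 ≤ p - 1 := by omega
      have h2 : (p - 1 - (lo-1)).toNat ≤ m := by omega
      obtain ⟨a1, a2, a3, a4⟩ := ih (p-1) h1 h2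
      refine ⟨a1, by omega, fun t ht1 ht2 => ?_, a4⟩
      rcases Int.lt_or_le t p with hl | hg
      · exact a3 t ht1 (by omega)
      · have : t = p := by omega
        subst this; exact hc.2
    · refine ⟨hp, le_refl _, fun t ht1 ht2 => by omega, fun hge => ?_⟩
      intro hx
      exact hc ⟨hge, hx⟩

theorem bSpec_noGreater (a prevF : Nat → Int) {L J : Nat} (hL : 1 ≤ L) (hLJ : L ≤ J)
    (hmid : ∀ t, L ≤ t → t < J → a t ≤ a J) :
    bSpec a prevF L J = rmin prevF (L-1) (J-1) + a J := by
  unfold bSpec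
  rw [rmin_congr hLJ (f' := fun jj => prevF (jj-1) + a J)
      (fun t ht1 ht2 => by
        unfold gF
        rw [sMax_const_of a ht2 (fun u hu1 hu2 => hmid u (by omega) hu2)]),
    rmin_add_const (fun jj => prevF (jj-1)) (a J) L J]
  congr 1
  have := rmin_shift prevF (lo := L-1) (j := J-1) (by omega)
  rw [show L-1+1 = L by omega, show J-1+1 = J by omega] at this
  exact this

theorem bSpec_greater (a prevF : Nat → Int) {L P J : Nat} (hL : 1 ≤ L) (hLP : L ≤ P)
    (hPJ : P < J) (hmid : ∀ t, P < t → t < J → a t ≤ a J) (hgt : a J < a P) :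
    bSpec a prevF L J = min (bSpec a prevF L P) (rmin prevF P (J-1) + a J) := by
  unfold bSpec
  rw [rmin_split (gF a prevF J) hLP hPJ]
  congr 1
  · -- left endpoints in [L..P]: the segment max through J equals the one through P
    refine rmin_congr hLP (fun t ht1 ht2 => ?_)
    unfold gF
    congr 1
    rw [sMax_split a ht2 hPJ,
      sMax_const_of a (show P+1 ≤ J by omega) (fun u hu1 hu2 => hmid u (by omega) hu2)]
    have h1 := le_sMax_of_mem a ht2 (le_refl P)
    omega
  · -- left endpoints in (P..J]: segment max is a J
    rw [rmin_congr (show P+1 ≤ J by omega) (f' := fun jj => prevF (jj-1) + a J)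
        (fun t ht1 ht2 => by
          unfold gF
          rw [sMax_const_of a ht2 (fun u hu1 hu2 => hmid u (by omega) hu2)]),
      rmin_add_const (fun jj => prevF (jj-1)) (a J) (P+1) J]
    congr 1
    have := rmin_shift prevF (lo := P) (j := J-1) (by omega)
    rw [show J-1+1 = J by omega] at this
    exact this

def aFn (xs : List Int) (t : Nat) : Int := xs.getD t 0

theorem getD_set_int (l : List Int) (j : Nat) (v : Int) (j' : Nat) (h : j < l.length) :
    (l.set j v).getD j' 0 = if j' = j then v else l.getD j' 0 := by
  rcases eq_or_ne j' j with rfl | hne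
  · simp [List.getD_eq_getElem?_getD, List.getElem?_set, h]
  · simp [List.getD_eq_getElem?_getD, List.getElem?_set, (Ne.symm hne : j ≠ j'), hne]

theorem getD_replicate_int (n m : Nat) (a : Int) :
    (List.replicate n a).getD m 0 = if m < n then a else 0 := by
  unfold List.getD
  rw [List.getElem?_replicate]
  split_ifs <;> simp_all

set_option maxRecDepth 10000 in
theorem pvLayer_fold (nums prev : List Int) (li : Int) (hli : 1 ≤ li) :
    ∀ (m : Nat) (J : Nat) (st : List Int × List Int),
    nums.length - J = m →
    li.toNat ≤ J → J ≤ nums.length →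
    st.1.length = nums.length → st.2.length = nums.length →
    (∀ j', j' < nums.length → st.1.getD j' 0 =
      if li.toNat ≤ j' ∧ j' < J then min 2147483647 (bSpec (aFn nums) (aFn prev) li.toNat j')
      else 2147483647) →
    (∀ j', j' < nums.length → st.2.getD j' 0 =
      if li.toNat ≤ j' ∧ j' < J then bSpec (aFn nums) (aFn prev) li.toNat j'
      else 2147483647) →
    (let res := (PySem.List.pyRange (J:Int) (nums.length:Int) 1).foldl
      (fun (st : List Int × List Int) j =>
        let x := nums.getD j.toNat 0
        let p := pgLoop nums li x j.toNat (j-1)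
        let w := (PySem.List.pyRange (p+1) j 1).foldl (fun w t => min w (prev.getD t.toNat 0))
                   (prev.getD p.toNat 0)
        let cand := w + x
        let cand := if li ≤ p then min (st.2.getD p.toNat 0) cand else cand
        (st.1.set j.toNat (min 2147483647 cand), st.2.set j.toNat cand)) st
     res.1.length = nums.length ∧
     (∀ j', j' < nums.length → res.1.getD j' 0 =
       if li.toNat ≤ j' ∧ j' < nums.length then min 2147483647 (bSpec (aFn nums) (aFn prev) li.toNat j')
       else 2147483647)) := by
  intro m
  induction m with
  | zero =>
    intro J st hm hJ1 hJ2 hl1 hl2 hinv1 hinv2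
    have : J = nums.length := by omega
    subst this
    rw [PySem.List.pyRange_one_eq_nil (le_refl _)]
    simp only [List.foldl_nil]
    exact ⟨hl1, fun j' hj' => by rw [hinv1 j' hj']⟩
  | succ m ih =>
    intro J st hm hJ1 hJ2 hl1 hl2 hinv1 hinv2
    have hJn : J < nums.length := by omega
    rw [PySem.List.pyRange_one_cons (by exact_mod_cast hJn)]
    simp only [List.foldl_cons]
    -- analyze one step at j = J
    have htn : ((J:Int)).toNat = J := by omega
    set L := li.toNat with hLdef
    have hL1 : 1 ≤ L := by omega
    have hLJ : L ≤ J := hJ1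
    -- pgLoop facts
    obtain ⟨hp1, hp2, hp3, hp4⟩ := pgLoop_spec nums li (nums.getD ((J:Int)).toNat 0) hli
      ((J:Int)).toNat ((J:Int) - 1) (by omega) (by omega)
    set p := pgLoop nums li (nums.getD ((J:Int)).toNat 0) ((J:Int)).toNat ((J:Int) - 1) with hpdef
    have hp0 : 0 ≤ p := by omega
    have hPJ1 : p.toNat ≤ J - 1 := by omega
    have hPL : L - 1 ≤ p.toNat := by omega
    -- the w fold computes rmin of prev over [p.toNat .. J-1]
    have hw : (PySem.List.pyRange (p+1) (J:Int) 1).foldl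
        (fun w t => min w (prev.getD t.toNat 0)) (prev.getD p.toNat 0)
        = rmin (aFn prev) p.toNat (J-1) := by
      rcases Nat.lt_or_ge p.toNat (J-1) with hlt | hge
      · have hcast1 : ((p.toNat + 1 : Nat):Int) = p + 1 := by omega
        have hcast2 : (((J - 1 : Nat)):Int) + 1 = (J:Int) := by omega
        rw [← hcast1, ← hcast2]
        show (PySem.List.pyRange ((p.toNat+1:Nat):Int) ((((J-1:Nat)):Int) + 1) 1).foldl
          (fun w t => min w (aFn prev t.toNat)) (aFn prev p.toNat) = _
        rw [foldl_min_pyRange (aFn prev) (p.toNat+1) (J-1) (by omega)]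
        rw [rmin_cons (aFn prev) (show p.toNat < J-1 by omega)]
      · have hpe : p.toNat = J - 1 := by omega
        rw [PySem.List.pyRange_one_eq_nil (by omega), List.foldl_nil, hpe,
          rmin_self (aFn prev) (le_refl _)]
        rfl
    -- the candidate equals bSpec at J
    have hcand : (if li ≤ p then
          min (st.2.getD p.toNat 0) (rmin (aFn prev) p.toNat (J-1) + nums.getD J 0)
        else rmin (aFn prev) p.toNat (J-1) + nums.getD J 0)
        = bSpec (aFn nums) (aFn prev) L J := by
      have hmid : ∀ t, p.toNat < t → t < J → aFn nums t ≤ aFn nums J := by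
        intro t ht1 ht2
        have := hp3 (t:Int) (by omega) (by omega)
        rw [htn] at this
        simpa [aFn] using this
      split_ifs with hc
      · have hLP : L ≤ p.toNat := by omega
        have hgt : aFn nums J < aFn nums p.toNat := by
          have := hp4 hc
          rw [htn] at this
          simp only [aFn]
          omega
        rw [hinv2 p.toNat (by omega), if_pos ⟨hLP, by omega⟩,
          show nums.getD J 0 = aFn nums J from rfl,
          bSpec_greater (aFn nums) (aFn prev) hL1 hLP (by omega) hmid hgt]
      · have hpe : p.toNat = L - 1 := by omega
        rw [show nums.getD J 0 = aFn nums J from rfl, hpe,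
          bSpec_noGreater (aFn nums) (aFn prev) hL1 hLJ
            (fun t ht1 ht2 => hmid t (by omega) ht2)]
    -- apply the IH to the updated state
    have hstep := ih (J+1)
      (st.1.set ((J:Int)).toNat (min 2147483647 (if li ≤ p then
          min (st.2.getD p.toNat 0) ((PySem.List.pyRange (p+1) (J:Int) 1).foldl
            (fun w t => min w (prev.getD t.toNat 0)) (prev.getD p.toNat 0) + nums.getD ((J:Int)).toNat 0)
        else (PySem.List.pyRange (p+1) (J:Int) 1).foldl
            (fun w t => min w (prev.getD t.toNat 0)) (prev.getD p.toNat 0) + nums.getD ((J:Int)).toNat 0)),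
       st.2.set ((J:Int)).toNat (if li ≤ p then
          min (st.2.getD p.toNat 0) ((PySem.List.pyRange (p+1) (J:Int) 1).foldl
            (fun w t => min w (prev.getD t.toNat 0)) (prev.getD p.toNat 0) + nums.getD ((J:Int)).toNat 0)
        else (PySem.List.pyRange (p+1) (J:Int) 1).foldl
            (fun w t => min w (prev.getD t.toNat 0)) (prev.getD p.toNat 0) + nums.getD ((J:Int)).toNat 0))
      (by omega) (by omega) (by omega)
      (by simpa using hl1) (by simpa using hl2)
      (by
        intro j' hj'
        rw [htn, getD_set_int _ _ _ _ (by omega)]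
        by_cases he : j' = J
        · subst he
          rw [if_pos rfl, hw, hcand, if_pos ⟨hLJ, by omega⟩]
        · rw [if_neg he, hinv1 j' hj']
          by_cases hcc : L ≤ j' ∧ j' < J
          · rw [if_pos hcc, if_pos ⟨hcc.1, by omega⟩]
          · rw [if_neg hcc, if_neg (by omega)])
      (by
        intro j' hj'
        rw [htn, getD_set_int _ _ _ _ (by omega)]
        by_cases he : j' = J
        · subst he
          rw [if_pos rfl, hw, hcand, if_pos ⟨hLJ, by omega⟩]
        · rw [if_neg he, hinv2 j' hj']
          by_cases hcc : L ≤ j' ∧ j' < J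
          · rw [if_pos hcc, if_pos ⟨hcc.1, by omega⟩]
          · rw [if_neg hcc, if_neg (by omega)])
    have hcast : (J:Int) + 1 = ((J+1 : Nat):Int) := by omega
    rw [← hcast] at hstep
    exact hstep

theorem getD_set' {α : Type} (l : List α) (d : α) (j : Nat) (v : α) (j' : Nat) (h : j < l.length) :
    (l.set j v).getD j' d = if j' = j then v else l.getD j' d := by
  rcases eq_or_ne j' j with rfl | hne
  · simp [List.getD_eq_getElem?_getD, List.getElem?_set, h]
  · simp [List.getD_eq_getElem?_getD, List.getElem?_set, (Ne.symm hne : j ≠ j'), hne]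

theorem pvLayer_spec (nums prev : List Int) (i : Int) (h2 : 2 ≤ i) :
    (pvLayer nums prev i).length = nums.length ∧
    ∀ j', j' < nums.length → (pvLayer nums prev i).getD j' 0 =
      if (i-1).toNat ≤ j' then min 2147483647 (bSpec (aFn nums) (aFn prev) (i-1).toNat j')
      else 2147483647 := by
  simp only [pvLayer]
  rw [show (i - 1 : Int) = (((i-1).toNat : Nat) : Int) from by omega]
  simp only [Int.toNat_natCast]
  rcases Nat.lt_or_ge nums.length (i-1).toNat with hlt | hge
  · -- the layer loop is empty
    rw [PySem.List.pyRange_one_eq_nil (by exact_mod_cast Nat.le_of_lt hlt)]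
    simp only [List.foldl_nil]
    refine ⟨by simp, fun j' hj' => ?_⟩
    rw [getD_replicate_int, if_pos hj', if_neg (by omega)]
  · have h := pvLayer_fold nums prev (((i-1).toNat : Nat) : Int) (by exact_mod_cast (by omega : 1 ≤ (i-1).toNat))
      (nums.length - (i-1).toNat) (i-1).toNat
      (List.replicate nums.length (2147483647:Int), List.replicate nums.length (2147483647:Int))
      (by simp) (by simp) (by omega) (by simp) (by simp)
      (fun j' hj' => by
        rw [getD_replicate_int, if_pos hj', if_neg (by simp only [Int.toNat_natCast]; omega)])
      (fun j' hj' => by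
        rw [getD_replicate_int, if_pos hj', if_neg (by simp only [Int.toNat_natCast]; omega)])
    simp only [Int.toNat_natCast] at h
    refine ⟨h.1, fun j' hj' => ?_⟩
    rw [h.2 j' hj']
    by_cases hc : (i-1).toNat ≤ j'
    · rw [if_pos ⟨hc, hj'⟩, if_pos hc]
    · rw [if_neg (by omega), if_neg hc]

-- ===== A-side =====

theorem length_pvSet2 (dp : List (List Int)) (i j : Nat) (v : Int) :
    (pvSet2 dp i j v).length = dp.length := by simp [pvSet2]

theorem getD_pvSet2 (dp : List (List Int)) (i j : Nat) (v : Int) (r : Nat) (h : i < dp.length) :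
    (pvSet2 dp i j v).getD r [] = if r = i then (dp.getD i []).set j v else dp.getD r [] := by
  unfold pvSet2
  exact getD_set' dp [] i _ r h

theorem pvSet2_collapse (dp : List (List Int)) (i j : Nat) (v w : Int) (h : i < dp.length) :
    pvSet2 (pvSet2 dp i j v) i j w = pvSet2 dp i j w := by
  unfold pvSet2
  rw [getD_set' dp [] i _ i h, if_pos rfl, List.set_set, List.set_set]

set_option maxRecDepth 10000 in
theorem A_inner (nums : List Int) (i j : Int) (h2 : 2 ≤ i) (hij : i - 1 ≤ j) :
    ∀ (d : Nat) (jj c : Int) (dp : List (List Int)),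
    (jj - (i-1)).toNat = d → i - 1 ≤ jj → jj ≤ j →
    i.toNat < dp.length →
    j.toNat < (dp.getD i.toNat []).length →
    ((PySem.List.pyRange jj (i-2) (-1)).foldl (fun (st : Int × List (List Int)) jj =>
        (max st.1 (nums.getD jj.toNat 0),
         pvSet2 st.2 i.toNat j.toNat
           (min ((st.2.getD i.toNat []).getD j.toNat 0)
             (((st.2.getD (i-1).toNat []).getD (jj-1).toNat 0)
               + max st.1 (nums.getD jj.toNat 0))))) (c, dp))
    = (max c (sMax (aFn nums) (i-1).toNat jj.toNat),
       pvSet2 dp i.toNat j.toNat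
        (min ((dp.getD i.toNat []).getD j.toNat 0)
          (rmin (fun t => (dp.getD (i-1).toNat []).getD (t-1) 0
              + max c (sMax (aFn nums) t jj.toNat)) (i-1).toNat jj.toNat))) := by
  intro d
  induction d with
  | zero =>
    intro jj c dp hd hjj1 hjj2 hilen hrowlen
    have hje : jj = i - 1 := by omega
    subst hje
    rw [PySem.List.pyRange_neg_one_cons (by omega), PySem.List.pyRange_neg_one_eq_nil (by omega)]
    simp only [List.foldl_cons, List.foldl_nil]
    rw [sMax_self, rmin_self _ (le_refl _), sMax_self,
      show ((i-1-1 : Int)).toNat = (i-1).toNat - 1 from by omega,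
      show aFn nums (i-1).toNat = nums.getD (i-1).toNat 0 from rfl]
  | succ d ih =>
    intro jj c dp hd hjj1 hjj2 hilen hrowlen
    have hjgt : i - 1 < jj := by omega
    rw [PySem.List.pyRange_neg_one_cons (by omega)]
    simp only [List.foldl_cons]
    have hrowi : (pvSet2 dp i.toNat j.toNat
        (min ((dp.getD i.toNat []).getD j.toNat 0)
          ((dp.getD (i-1).toNat []).getD (jj-1).toNat 0 + max c (nums.getD jj.toNat 0)))).getD i.toNat []
        = (dp.getD i.toNat []).set j.toNat
            (min ((dp.getD i.toNat []).getD j.toNat 0)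
              ((dp.getD (i-1).toNat []).getD (jj-1).toNat 0 + max c (nums.getD jj.toNat 0))) := by
      rw [getD_pvSet2 _ _ _ _ _ hilen, if_pos rfl]
    have hrowi1 : (pvSet2 dp i.toNat j.toNat
        (min ((dp.getD i.toNat []).getD j.toNat 0)
          ((dp.getD (i-1).toNat []).getD (jj-1).toNat 0 + max c (nums.getD jj.toNat 0)))).getD (i-1).toNat []
        = dp.getD (i-1).toNat [] := by
      rw [getD_pvSet2 _ _ _ _ _ hilen, if_neg (by omega)]
    rw [ih (jj-1) (max c (nums.getD jj.toNat 0)) _ (by omega) (by omega) (by omega)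
      (by rw [length_pvSet2]; exact hilen)
      (by rw [hrowi]; simpa using hrowlen)]
    rw [hrowi, hrowi1, pvSet2_collapse _ _ _ _ _ hilen]
    have htj : (jj - 1).toNat = jj.toNat - 1 := by omega
    have htj1 : jj.toNat - 1 + 1 = jj.toNat := by omega
    rw [htj]
    have hsnoc : ∀ t : Nat, t ≤ jj.toNat - 1 →
        max (max c (nums.getD jj.toNat 0)) (sMax (aFn nums) t (jj.toNat - 1))
        = max c (sMax (aFn nums) t jj.toNat) := by
      intro t ht
      have hs := sMax_snoc (aFn nums) (jj := t) (j := jj.toNat - 1) ht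
      rw [htj1] at hs
      rw [hs, show aFn nums jj.toNat = nums.getD jj.toNat 0 from rfl]
      omega
    have hLle : (i-1).toNat ≤ jj.toNat - 1 := by omega
    simp only [Prod.mk.injEq]
    constructor
    · rw [hsnoc (i-1).toNat hLle]
    · congr 1
      rw [getD_set' _ _ _ _ _ hrowlen, if_pos rfl]
      rw [rmin_congr hLle (f' := fun t => (dp.getD (i-1).toNat []).getD (t-1) 0
            + max c (sMax (aFn nums) t jj.toNat))
          (fun t ht1 ht2 => by rw [hsnoc t ht2])]
      have hre := rmin_snoc (fun t => (dp.getD (i-1).toNat []).getD (t-1) 0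
            + max c (sMax (aFn nums) t jj.toNat)) (lo := (i-1).toNat) (j := jj.toNat - 1) hLle
      rw [htj1] at hre
      rw [hre]
      simp only []
      rw [sMax_self, show aFn nums jj.toNat = nums.getD jj.toNat 0 from rfl]
      omega

set_option maxRecDepth 10000 in
theorem A_layer (nums : List Int) (i : Int) (h2 : 2 ≤ i) (PREV : List Int) :
    ∀ (m : Nat) (J : Nat) (dp : List (List Int)),
    nums.length - J = m → (i-1).toNat ≤ J → J ≤ nums.length →
    i.toNat < dp.length →
    dp.getD (i-1).toNat [] = PREV →
    (dp.getD i.toNat []).length = nums.length →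
    (∀ j', j' < nums.length → (dp.getD i.toNat []).getD j' 0 =
      if (i-1).toNat ≤ j' ∧ j' < J
      then min 2147483647 (bSpec (aFn nums) (aFn PREV) (i-1).toNat j')
      else 2147483647) →
    (let dp' := (PySem.List.pyRange (J:Int) (nums.length:Int) 1).foldl (fun dp j =>
        ((PySem.List.pyRange j (i-2) (-1)).foldl (fun (st : Int × List (List Int)) jj =>
            (max st.1 (nums.getD jj.toNat 0),
             pvSet2 st.2 i.toNat j.toNat
               (min ((st.2.getD i.toNat []).getD j.toNat 0)
                 (((st.2.getD (i-1).toNat []).getD (jj-1).toNat 0)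
                   + max st.1 (nums.getD jj.toNat 0))))) (nums.getD j.toNat 0, dp)).2) dp
     dp'.length = dp.length ∧
     (∀ r, r ≠ i.toNat → dp'.getD r [] = dp.getD r []) ∧
     (dp'.getD i.toNat []).length = nums.length ∧
     (∀ j', j' < nums.length → (dp'.getD i.toNat []).getD j' 0 =
       if (i-1).toNat ≤ j' ∧ j' < nums.length
       then min 2147483647 (bSpec (aFn nums) (aFn PREV) (i-1).toNat j')
       else 2147483647)) := by
  intro m
  induction m with
  | zero =>
    intro J dp hm hJ1 hJ2 hilen hprev hrlen hrow
    have : J = nums.length := by omega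
    subst this
    rw [PySem.List.pyRange_one_eq_nil (le_refl _)]
    simp only [List.foldl_nil]
    exact ⟨by simp, by simp, hrlen, hrow⟩
  | succ m ih =>
    intro J dp hm hJ1 hJ2 hilen hprev hrlen hrow
    have hJn : J < nums.length := by omega
    rw [PySem.List.pyRange_one_cons (by exact_mod_cast hJn)]
    simp only [List.foldl_cons]
    have htn : ((J:Int)).toNat = J := by omega
    have hinner := A_inner nums i (J:Int) h2 (by omega) ((J:Int) - (i-1)).toNat (J:Int)
      (nums.getD ((J:Int)).toNat 0) dp rfl (by omega) (le_refl _) hilen (by simp only [Int.toNat_natCast, hrlen]; omega)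
    rw [hinner]
    simp only []
    -- the written value is the spec value
    have hv0 : (dp.getD i.toNat []).getD ((J:Int)).toNat 0 = 2147483647 := by
      rw [htn, hrow J hJn, if_neg (by omega)]
    have hval : min ((dp.getD i.toNat []).getD ((J:Int)).toNat 0)
        (rmin (fun t => (dp.getD (i-1).toNat []).getD (t-1) 0
          + max (nums.getD ((J:Int)).toNat 0) (sMax (aFn nums) t ((J:Int)).toNat)) (i-1).toNat ((J:Int)).toNat)
        = min 2147483647 (bSpec (aFn nums) (aFn PREV) (i-1).toNat J) := by
      rw [hv0, htn, hprev]
      congr 1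
      rw [rmin_congr (show (i-1).toNat ≤ J by omega)
          (f' := fun t => aFn PREV (t-1) + sMax (aFn nums) t J)
          (fun t ht1 ht2 => by
            have hle := le_sMax_of_mem (aFn nums) ht2 (le_refl J)
            have : max (nums.getD J 0) (sMax (aFn nums) t J) = sMax (aFn nums) t J := by
              rw [show nums.getD J 0 = aFn nums J from rfl]
              omega
            rw [this]
            rfl)]
      rfl
    rw [hval]
    -- apply the IH to the updated table
    have hnext := ih (J+1) (pvSet2 dp i.toNat ((J:Int)).toNat
        (min 2147483647 (bSpec (aFn nums) (aFn PREV) (i-1).toNat J)))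
      (by omega) (by omega) (by omega)
      (by rw [length_pvSet2]; exact hilen)
      (by rw [getD_pvSet2 _ _ _ _ _ hilen, if_neg (by omega)]; exact hprev)
      (by rw [getD_pvSet2 _ _ _ _ _ hilen, if_pos rfl]; simpa using hrlen)
      (by
        intro j' hj'
        rw [getD_pvSet2 _ _ _ _ _ hilen, if_pos rfl, htn,
          getD_set' _ _ _ _ _ (by simp only [Int.toNat_natCast, hrlen]; omega)]
        by_cases he : j' = J
        · subst he
          rw [if_pos rfl, if_pos ⟨hJ1, by omega⟩]
        · rw [if_neg he, hrow j' hj']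
          by_cases hcc : (i-1).toNat ≤ j' ∧ j' < J
          · rw [if_pos hcc, if_pos ⟨hcc.1, by omega⟩]
          · rw [if_neg hcc, if_neg (by omega)])
    have hcast : (J:Int) + 1 = ((J+1 : Nat):Int) := by omega
    rw [← hcast] at hnext
    refine ⟨?_, ?_, hnext.2.2.1, hnext.2.2.2⟩
    · rw [hnext.1, length_pvSet2]
    · intro r hr
      rw [hnext.2.1 r hr, getD_pvSet2 _ _ _ _ _ hilen, if_neg hr]

theorem getD_replicate' {α : Type} (n m : Nat) (a : α) (d : α) :
    (List.replicate n a).getD m d = if m < n then a else d := by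
  rcases Nat.lt_or_ge m n with h | h
  · simp [List.getD_eq_getElem?_getD, List.getElem?_replicate, h]
  · rw [List.getD_eq_getElem?_getD, List.getElem?_eq_none (by simpa using h),
      if_neg (Nat.not_lt.mpr h)]
    rfl

theorem A_init (nums : List Int) (k : Int) (hk : 1 ≤ k) :
    ∀ (J : Nat), J ≤ nums.length →
    (let dp0 : List (List Int) := List.replicate (k+1).toNat
        (List.replicate nums.length (2147483647:Int))
     let st := (List.range J).foldl (fun (st : Int × List (List Int)) j =>
        (max st.1 (nums.getD j 0),
         pvSet2 (pvSet2 st.2 1 j (max st.1 (nums.getD j 0))) 0 j 0)) (nums.getD 0 0, dp0)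
     st.1 = sMax (aFn nums) 0 (J-1) ∧
     st.2.length = (k+1).toNat ∧
     (∀ r, 2 ≤ r → st.2.getD r [] = dp0.getD r []) ∧
     (st.2.getD 1 []).length = nums.length ∧
     (st.2.getD 0 []).length = nums.length ∧
     (∀ j', j' < nums.length → (st.2.getD 1 []).getD j' 0 =
        if j' < J then sMax (aFn nums) 0 j' else 2147483647)) := by
  have h2len : 2 ≤ (k+1).toNat := by omega
  intro J
  induction J with
  | zero =>
    intro hJ
    dsimp only
    simp only [List.range_zero, List.foldl_nil]
    refine ⟨by rw [Nat.zero_sub, sMax_self]; rfl, by simp, by simp, ?_, ?_, fun j' hj' => ?_⟩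
    · rw [getD_replicate' _ _ _ _, if_pos (by omega)]; simp
    · rw [getD_replicate' _ _ _ _, if_pos (by omega)]; simp
    · rw [getD_replicate' _ _ _ _, if_pos (by omega), getD_replicate_int, if_pos hj',
        if_neg (by omega)]
  | succ J ih =>
    intro hJ
    dsimp only
    obtain ⟨h1, h2, h3, h4, h5, h6⟩ := ih (by omega)
    rw [List.range_succ, List.foldl_append]
    simp only [List.foldl_cons, List.foldl_nil]
    have hpm' : ∀ x : Int, x = sMax (aFn nums) 0 (J-1) →
        max x (nums.getD J 0) = sMax (aFn nums) 0 J := by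
      intro x hx
      subst hx
      rcases Nat.eq_zero_or_pos J with rfl | hpos
      · rw [Nat.zero_sub, sMax_self]
        simp [aFn]
      · have hs := sMax_snoc (aFn nums) (jj := 0) (j := J-1) (by omega)
        rw [show J - 1 + 1 = J by omega] at hs
        rw [hs]
        rfl
    refine ⟨?_, ?_, ?_, ?_, ?_, ?_⟩
    · rw [Nat.succ_sub_one]
      exact hpm' _ h1
    · rw [length_pvSet2, length_pvSet2]
      exact h2
    · intro r hr
      rw [getD_pvSet2 _ _ _ _ _ (by rw [length_pvSet2, h2]; omega), if_neg (by omega),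
        getD_pvSet2 _ _ _ _ _ (by rw [h2]; omega), if_neg (by omega)]
      exact h3 r hr
    · rw [getD_pvSet2 _ _ _ _ _ (by rw [length_pvSet2, h2]; omega), if_neg (by omega),
        getD_pvSet2 _ _ _ _ _ (by rw [h2]; omega), if_pos rfl]
      simpa using h4
    · rw [getD_pvSet2 _ _ _ _ _ (by rw [length_pvSet2, h2]; omega), if_pos rfl,
        getD_pvSet2 _ _ _ _ _ (by rw [h2]; omega), if_neg (by omega)]
      simpa using h5
    · intro j' hj'
      rw [getD_pvSet2 _ _ _ _ _ (by rw [length_pvSet2, h2]; omega), if_neg (by omega),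
        getD_pvSet2 _ _ _ _ _ (by rw [h2]; omega), if_pos rfl,
        getD_set' _ _ _ _ _ (by rw [h4]; omega)]
      by_cases he : j' = J
      · subst he
        rw [if_pos rfl, hpm' _ h1, if_pos (by omega)]
      · rw [if_neg he, h6 j' hj']
        by_cases hlt : j' < J
        · rw [if_pos hlt, if_pos (by omega)]
        · rw [if_neg hlt, if_neg (by omega)]

theorem B_init (nums : List Int) :
    ∀ (J : Nat), J ≤ nums.length →
    (let st := (nums.take J).foldl (fun (st : Int × List Int) x =>
        (max st.1 x, st.2 ++ [max st.1 x])) (nums.getD 0 0, [])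
     st.1 = sMax (aFn nums) 0 (J-1) ∧
     st.2.length = J ∧
     (∀ j', j' < J → st.2.getD j' 0 = sMax (aFn nums) 0 j')) := by
  intro J
  induction J with
  | zero =>
    intro hJ
    dsimp only
    simp only [List.take_zero, List.foldl_nil]
    exact ⟨by rw [Nat.zero_sub, sMax_self]; rfl, rfl, fun j' hj' => by omega⟩
  | succ J ih =>
    intro hJ
    dsimp only
    obtain ⟨h1, h2, h3⟩ := ih (by omega)
    have htake : nums.take (J+1) = nums.take J ++ [nums.getD J 0] := by
      rw [List.take_succ]
      congr 1
      rw [List.getD_eq_getElem?_getD, List.getElem?_eq_getElem (by omega)]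
      rfl
    rw [htake, List.foldl_append]
    simp only [List.foldl_cons, List.foldl_nil]
    have hpm' : ∀ x : Int, x = sMax (aFn nums) 0 (J-1) →
        max x (nums.getD J 0) = sMax (aFn nums) 0 J := by
      intro x hx
      subst hx
      rcases Nat.eq_zero_or_pos J with rfl | hpos
      · rw [Nat.zero_sub, sMax_self]
        simp [aFn]
      · have hs := sMax_snoc (aFn nums) (jj := 0) (j := J-1) (by omega)
        rw [show J - 1 + 1 = J by omega] at hs
        rw [hs]
        rfl
    refine ⟨?_, ?_, ?_⟩
    · rw [Nat.succ_sub_one]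
      exact hpm' _ h1
    · simp only [List.length_append, h2, List.length_singleton]
    · intro j' hj'
      by_cases he : j' = J
      · subst he
        rw [List.getD_eq_getElem?_getD, List.getElem?_append_right (by omega), h2]
        simp only [Nat.sub_self, List.getElem?_cons_zero, Option.getD_some]
        exact hpm' _ h1
      · rw [List.getD_eq_getElem?_getD, List.getElem?_append_left (by omega),
          ← List.getD_eq_getElem?_getD]
        exact h3 j' (by omega)

theorem getD_of_len_le {α : Type} (l : List α) (d : α) (t : Nat) (h : l.length ≤ t) :
    l.getD t d = d := by
  simp [List.getD_eq_getElem?_getD, List.getElem?_eq_none h]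

set_option maxRecDepth 10000 in
theorem AB_outer (nums : List Int) (k : Int) (hn : 0 < nums.length) :
    ∀ (m : Nat) (i0 : Int) (dpA : List (List Int)) (prevB : List Int),
    ((k+1) - i0).toNat = m → 2 ≤ i0 → i0 ≤ k+1 →
    dpA.length = (k+1).toNat →
    (∀ r, i0.toNat ≤ r → r < (k+1).toNat →
      dpA.getD r [] = List.replicate nums.length (2147483647:Int)) →
    (dpA.getD (i0-1).toNat []).length = nums.length →
    prevB.length = nums.length →
    (∀ t, (dpA.getD (i0-1).toNat []).getD t 0 = prevB.getD t 0) →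
    ((((PySem.List.pyRange i0 (k+1) 1).foldl (fun dp i =>
        (PySem.List.pyRange (i-1) (nums.length:Int) 1).foldl (fun dp j =>
          ((PySem.List.pyRange j (i-2) (-1)).foldl (fun (st : Int × List (List Int)) jj =>
              (max st.1 (nums.getD jj.toNat 0),
               pvSet2 st.2 i.toNat j.toNat
                 (min ((st.2.getD i.toNat []).getD j.toNat 0)
                   (((st.2.getD (i-1).toNat []).getD (jj-1).toNat 0)
                     + max st.1 (nums.getD jj.toNat 0))))) (nums.getD j.toNat 0, dp)).2) dp)
        dpA).getD k.toNat []).getD (nums.length - 1) 0)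
    = ((PySem.List.pyRange i0 (k+1) 1).foldl (fun prev i => pvLayer nums prev i) prevB).getD
        (nums.length - 1) 0 := by
  intro m
  induction m with
  | zero =>
    intro i0 dpA prevB hm h2i hik hlen hrows hrl hpl hmatch
    have : i0 = k + 1 := by omega
    subst this
    rw [PySem.List.pyRange_one_eq_nil (le_refl _)]
    simp only [List.foldl_nil]
    have : (k + 1 - 1 : Int).toNat = k.toNat := by omega
    rw [this] at hmatch
    exact hmatch _
  | succ m ih =>
    intro i0 dpA prevB hm h2i hik hlen hrows hrl hpl hmatch
    have hik' : i0 ≤ k := by omega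
    rw [PySem.List.pyRange_one_cons (by omega)]
    simp only [List.foldl_cons]
    have hfe : aFn (dpA.getD (i0-1).toNat []) = aFn prevB := funext (fun t => hmatch t)
    -- B side one step
    obtain ⟨f1, f2⟩ := pvLayer_spec nums prevB i0 h2i
    rcases Nat.lt_or_ge nums.length (i0-1).toNat with hbig | hle
    · -- the layer loop on the A side is empty (more parts than elements)
      rw [PySem.List.pyRange_one_eq_nil (by omega)]
      simp only [List.foldl_nil]
      refine ih (i0+1) dpA (pvLayer nums prevB i0) (by omega) (by omega) (by omega)
        hlen (fun r hr1 hr2 => hrows r (by omega) hr2) ?_ f1 ?_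
      · have : (i0 + 1 - 1).toNat = i0.toNat := by omega
        rw [this, hrows i0.toNat (le_refl _) (by omega)]
        simp
      · intro t
        have : (i0 + 1 - 1).toNat = i0.toNat := by omega
        rw [this, hrows i0.toNat (le_refl _) (by omega)]
        rcases Nat.lt_or_ge t nums.length with ht | ht
        · rw [getD_replicate_int, if_pos ht, f2 t ht, if_neg (by omega)]
        · rw [getD_replicate_int, if_neg (by omega),
            getD_of_len_le _ _ _ (by rw [f1]; omega)]
    · -- one real layer on both sides
      rw [show PySem.List.pyRange (i0-1) ((nums.length:Nat):Int) 1
          = PySem.List.pyRange ((((i0-1).toNat:Nat)):Int) ((nums.length:Nat):Int) 1 from by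
        rw [Int.toNat_of_nonneg (by omega : (0:Int) ≤ i0 - 1)]]
      obtain ⟨e1, e2, e3, e4⟩ := A_layer nums i0 h2i (dpA.getD (i0-1).toNat [])
        (nums.length - (i0-1).toNat) (i0-1).toNat dpA rfl (le_refl _) hle
        (by omega) rfl
        (by rw [hrows i0.toNat (by omega) (by omega)]; simp)
        (fun j' hj' => by
          rw [hrows i0.toNat (by omega) (by omega), getD_replicate_int, if_pos hj',
            if_neg (by omega)])
      refine ih (i0+1) _ (pvLayer nums prevB i0) (by omega) (by omega) (by omega)
        (by rw [e1, hlen]) ?_ ?_ f1 ?_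
      · intro r hr1 hr2
        rw [e2 r (by omega)]
        exact hrows r (by omega) hr2
      · have : (i0 + 1 - 1).toNat = i0.toNat := by omega
        rw [this]
        exact e3
      · intro t
        have hti : (i0 + 1 - 1).toNat = i0.toNat := by omega
        rw [hti]
        rcases Nat.lt_or_ge t nums.length with ht | ht
        · rw [e4 t ht, f2 t ht, hfe]
          by_cases hc : (i0-1).toNat ≤ t
          · rw [if_pos ⟨hc, ht⟩, if_pos hc]
          · rw [if_neg (by omega), if_neg hc]
        · rw [getD_of_len_le _ _ _ (by rw [e3]; omega),
            getD_of_len_le _ _ _ (by rw [f1]; omega)]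
theorem main_eq (nums : List Int) (k : Int) (h1 : nums ≠ []) (hk : 1 ≤ k) :
    minCostToSplitArray nums k = minCostToSplitArray_alt nums k := by
  have hn : 0 < nums.length := List.length_pos_iff.mpr h1
  obtain ⟨a1, a2, a3, a4, a5, a6⟩ := A_init nums k hk nums.length (le_refl _)
  obtain ⟨b1, b2, b3⟩ := B_init nums nums.length (le_refl _)
  rw [List.take_length] at b2 b3
  simp only [minCostToSplitArray, minCostToSplitArray_alt]
  refine AB_outer nums k hn ((k+1)-2).toNat 2 _ _ rfl (by omega) (by omega)
    a2 ?_ ?_ b2 ?_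
  · intro r hr1 hr2
    rw [a3 r (by omega), getD_replicate' _ _ _ _, if_pos hr2]
  · rw [show ((2:Int) - 1).toNat = 1 from by omega]
    exact a4
  · intro t
    rw [show ((2:Int) - 1).toNat = 1 from by omega]
    rcases Nat.lt_or_ge t nums.length with ht | ht
    · rw [a6 t ht, if_pos ht, b3 t ht]
    · rw [getD_of_len_le _ _ _ (by rw [a4]; omega), getD_of_len_le _ _ _ (by rw [b2]; omega)]

-- ===== VERDICT (by name: the statement is the Claim_ definition above) =====
theorem minCostToSplitArray_spec : Claim_equal_minCostToSplitArray := by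
  intro nums k hdom hpre
  unfold Spec_minCostToSplitArray
  exact main_eq nums k hpre.1 hpre.2
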